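-- pv_equiv track=rewrite | github.com/Easy-BS/v0.1.1 | easybs/generated_idfs/test/(Bak)Add_Cali.py | _month_cell_to_int
-- ===== SOURCE A (Python) =====
-- MONTH_NAME_TO_INT = {
--     "january": 1, "february": 2, "march": 3, "april": 4,
--     "may": 5, "june": 6, "july": 7, "august": 8,
--     "september": 9, "october": 10, "november": 11, "december": 12,
-- }
--
-- def _month_cell_to_int(x) -> int | None:
--     if x is None:
--         return None
--     s = str(x).strip().lower()
--     # handle "January" or "Jan" (optional)
--     if s in MONTH_NAME_TO_INT:
--         return MONTH_NAME_TO_INT[s]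
--     # allow "Jan", "Feb" if they appear
--     for k, v in MONTH_NAME_TO_INT.items():
--         if k.startswith(s) and len(s) >= 3:
--             return v
--     # allow numeric month "1", "01"
--     if s.isdigit():
--         mm = int(s)
--         return mm if 1 <= mm <= 12 else None
--     return None
-- ===== SOURCE B (Python) =====
-- MONTH_NAME_TO_INT = {
--     "january": 1, "february": 2, "march": 3, "april": 4,
--     "may": 5, "june": 6, "july": 7, "august": 8,
--     "september": 9, "october": 10, "november": 11, "december": 12,
-- }
--
-- # Works because no two month names share their first three letters, and a
-- # string of length >= 3 abbreviates month k iff it is a prefix of k: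
-- # the first three letters pick the unique candidate, startswith verifies it.
-- _HEAD3 = {k[:3]: (k, v) for k, v in MONTH_NAME_TO_INT.items()}
--
-- def _month_cell_to_int(x):
--     if x is None:
--         return None
--     s = str(x).strip().lower()
--     if s.isdigit():
--         mm = int(s)
--         return mm if 1 <= mm <= 12 else None
--     if len(s) < 3:
--         return None
--     entry = _HEAD3.get(s[:3])
--     if entry is not None and entry[0].startswith(s):
--         return entry[1]
--     return None
-- ===== Notes on version B (the rewrite author's own statement) =====
-- stated objective: alternative
-- what changed: B handles the digit case first (digits and month-name prefixes are disjoint) and replaces A's exact-match-then-linear-startswith scan over all 12 names by a decision on the first three letters: a 12-entry head3 table picks the unique candidate month, a single startswith verifies it.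
import Mathlib
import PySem

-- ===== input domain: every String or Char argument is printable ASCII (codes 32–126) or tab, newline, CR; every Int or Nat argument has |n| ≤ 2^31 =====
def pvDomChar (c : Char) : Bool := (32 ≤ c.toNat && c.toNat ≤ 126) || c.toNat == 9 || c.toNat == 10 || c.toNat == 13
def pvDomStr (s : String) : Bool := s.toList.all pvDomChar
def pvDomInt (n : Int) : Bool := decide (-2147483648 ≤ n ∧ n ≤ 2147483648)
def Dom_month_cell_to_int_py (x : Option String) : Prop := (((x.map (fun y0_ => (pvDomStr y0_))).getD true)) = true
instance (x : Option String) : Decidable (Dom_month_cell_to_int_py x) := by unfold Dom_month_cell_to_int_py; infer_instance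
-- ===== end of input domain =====

-- B checks digits first (digits never abbreviate a month name) and resolves month
-- names by their unique first three letters via a 12-entry table plus one
-- startswith verification, instead of A's exact hit followed by a linear scan.

-- ===== PORT A =====
def MONTH_NAME_TO_INT : PySem.Dict String Int :=
  PySem.Dict.ofList [("january", 1), ("february", 2), ("march", 3), ("april", 4),
    ("may", 5), ("june", 6), ("july", 7), ("august", 8),
    ("september", 9), ("october", 10), ("november", 11), ("december", 12)]

-- the tail of A after the name checks: `if s.isdigit(): mm = int(s); return mm if 1 <= mm <= 12 else None` / `return None`
-- (int(s) cannot raise when s.isdigit() holds, so the `none` arm of ofStr? is unreachable there)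
def pyDigitTailA (s : String) : Option Int :=
  if PySem.Str.strIsdigit s then
    match PySem.Int.ofStr? s with
    | some mm => if 1 ≤ mm ∧ mm ≤ 12 then some mm else none
    | none => none
  else none

def month_cell_to_int_py (x : Option String) : Option Int :=
  match x with
  | none => none
  | some y =>
    let s := PySem.Str.lower (PySem.Str.strip y)
    match MONTH_NAME_TO_INT.get? s with
    | some v => some v
    | none =>
      -- `for k, v in MONTH_NAME_TO_INT.items(): if k.startswith(s) and len(s) >= 3: return v`
      match MONTH_NAME_TO_INT.items.find?
          (fun kv => PySem.Str.startswith kv.1 s && decide ((3 : Int) ≤ PySem.Str.len s)) with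
      | some kv => some kv.2
      | none => pyDigitTailA s

-- ===== PORT B =====
-- _HEAD3 = {k[:3]: (k, v) for k, v in MONTH_NAME_TO_INT.items()}  (written out: the 12 heads are distinct)
def HEAD3 : PySem.Dict String (String × Int) :=
  PySem.Dict.ofList
    [("jan", ("january", 1)), ("feb", ("february", 2)), ("mar", ("march", 3)),
     ("apr", ("april", 4)), ("may", ("may", 5)), ("jun", ("june", 6)),
     ("jul", ("july", 7)), ("aug", ("august", 8)), ("sep", ("september", 9)),
     ("oct", ("october", 10)), ("nov", ("november", 11)), ("dec", ("december", 12))]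

def month_cell_to_int_py_alt (x : Option String) : Option Int :=
  match x with
  | none => none
  | some y =>
    let s := PySem.Str.lower (PySem.Str.strip y)
    if PySem.Str.strIsdigit s then
      match PySem.Int.ofStr? s with
      | some mm => if 1 ≤ mm ∧ mm ≤ 12 then some mm else none
      | none => none
    else if PySem.Str.len s < 3 then none
    else
      match HEAD3.get? (PySem.Str.slice s none (some 3)) with
      | some entry => if PySem.Str.startswith entry.1 s then some entry.2 else none
      | none => none

-- ===== PRECONDITION & SPEC =====
def Spec_month_cell_to_int_py (x : Option String) (out : Option Int) : Prop := out = month_cell_to_int_py_alt x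
instance (x : Option String) (out : Option Int) : Decidable (Spec_month_cell_to_int_py x out) := by unfold Spec_month_cell_to_int_py; infer_instance

-- ===== CLAIM =====
def Claim_equal_month_cell_to_int_py : Prop := ∀ (x : Option String), Dom_month_cell_to_int_py x → Spec_month_cell_to_int_py x (month_cell_to_int_py x)

-- ===== LEMMAS AND PROOFS =====

-- all strings that can hit either name branch: the prefixes of length ≥ 3 of the month names
def pvKeyList : List String :=
  ["jan", "janu", "janua", "januar", "january", "feb", "febr", "febru", "februa", "februar",
   "february", "mar", "marc", "march", "apr", "apri", "april", "may", "jun", "june", "jul",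
   "july", "aug", "augu", "augus", "august", "sep", "sept", "septe", "septem", "septemb",
   "septembe", "september", "oct", "octo", "octob", "octobe", "october", "nov", "nove",
   "novem", "novemb", "novembe", "november", "dec", "dece", "decem", "decemb", "decembe",
   "december"]

lemma pv_prefix_mem (t k : String) (hpre : t.toList <+: k.toList) (h3 : 3 ≤ t.toList.length)
    (hkey : ∀ L : Nat, 3 ≤ L → L ≤ k.toList.length → String.ofList (k.toList.take L) ∈ pvKeyList) :
    t ∈ pvKeyList := by
  have hlen := hpre.length_le
  have ht : t = String.ofList (k.toList.take t.toList.length) := by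
    apply String.toList_inj.mp
    simpa using List.prefix_iff_eq_take.mp hpre
  rw [ht]
  exact hkey _ h3 hlen

-- a digit string never reaches the name branches (not in the prefix set), so B's
-- digit-first ordering agrees with A; the key set covers both name mechanisms
set_option maxRecDepth 40000 in
set_option maxHeartbeats 1600000 in
lemma pv_core (t : String) :
    (match MONTH_NAME_TO_INT.get? t with
     | some v => some v
     | none =>
       match MONTH_NAME_TO_INT.items.find?
           (fun kv => PySem.Str.startswith kv.1 t && decide ((3 : Int) ≤ PySem.Str.len t)) with
       | some kv => some kv.2
       | none => pyDigitTailA t)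
    = (if PySem.Str.strIsdigit t then
         match PySem.Int.ofStr? t with
         | some mm => if 1 ≤ mm ∧ mm ≤ 12 then some mm else none
         | none => none
       else if PySem.Str.len t < 3 then none
       else
         match HEAD3.get? (PySem.Str.slice t none (some 3)) with
         | some entry => if PySem.Str.startswith entry.1 t then some entry.2 else none
         | none => none) := by
  by_cases hm : t ∈ pvKeyList
  · fin_cases hm <;> decide
  · have hA : MONTH_NAME_TO_INT.get? t = none := by
      rw [PySem.Dict.get?_eq_none_iff_not_mem_keys]
      intro hk
      exact hm ((by decide : ∀ k ∈ MONTH_NAME_TO_INT.keys, k ∈ pvKeyList) t hk)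
    have h3' : 3 ≤ t.toList.length → (3 : Int) ≤ PySem.Str.len t := by
      have := PySem.Str.len_eq t; omega
    have hkeyOf : ∀ k : String, k ∈ ["january", "february", "march", "april", "may", "june",
        "july", "august", "september", "october", "november", "december"] →
        t.toList <+: k.toList → 3 ≤ t.toList.length → False := by
      intro k hk hpre h3
      refine hm (pv_prefix_mem t k hpre h3 ?_)
      fin_cases hk <;>
        (intro L hL3 hLl
         have h9 : L ≤ 9 := le_trans hLl (by decide)
         interval_cases L <;> decide)
    have hF : MONTH_NAME_TO_INT.items.find?
        (fun kv => PySem.Str.startswith kv.1 t && decide ((3 : Int) ≤ PySem.Str.len t)) = none := by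
      rw [List.find?_eq_none]
      intro kv hkv
      simp only [Bool.and_eq_true, decide_eq_true_eq, PySem.Str.startswith_eq, not_and]
      intro hsw h3
      have hpre : t.toList <+: kv.1.toList := (PySem.Chars.startswith_iff _ _).mp hsw
      have h3'' : 3 ≤ t.toList.length := by
        have := PySem.Str.len_eq t; omega
      refine hkeyOf kv.1 ?_ hpre h3''
      fin_cases hkv <;> decide
    rw [hA, hF]
    unfold pyDigitTailA
    by_cases hd : PySem.Str.strIsdigit t
    · simp only [if_pos hd]
    · simp only [if_neg hd]
      by_cases hlen : PySem.Str.len t < 3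
      · simp only [if_pos hlen]
      · rw [if_neg hlen]
        match hh : HEAD3.get? (PySem.Str.slice t none (some 3)) with
        | none => rfl
        | some entry =>
          have hns : ¬ PySem.Str.startswith entry.1 t = true := by
            intro hsw
            have hmem' := PySem.Dict.mem_items_of_get?_eq_some _ hh
            have hmem : entry ∈ HEAD3.items.map Prod.snd := List.mem_map_of_mem hmem'
            have hpre : t.toList <+: entry.1.toList := (PySem.Chars.startswith_iff _ _).mp hsw
            have h3'' : 3 ≤ t.toList.length := by
              have := PySem.Str.len_eq t; omega
            refine hkeyOf entry.1 ?_ hpre h3''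
            clear hmem' hh
            fin_cases hmem <;> decide
          simp only [if_neg hns]

-- ===== VERDICT =====
theorem month_cell_to_int_py_spec : Claim_equal_month_cell_to_int_py := by
  intro x _
  unfold Spec_month_cell_to_int_py month_cell_to_int_py month_cell_to_int_py_alt
  match x with
  | none => rfl
  | some y => exact pv_core (PySem.Str.lower (PySem.Str.strip y))
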